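-- pv_equiv track=rewrite | github.com/ShapeLayer/training | tasks/online_judge/baekjoon/python/1145.py | compute
-- ===== SOURCE A (Python) =====
-- def compute(arr: list[int]) -> int:
--     result = min(arr)
--     while True:
--         cnt = 0
--         for n in arr:
--             if result % n == 0:
--                 cnt += 1
--         if cnt > 2:
--             return result
--         result += 1
-- ===== SOURCE B (Python) =====
-- # B: closed-form over triples -- the answer is the smallest multiple (>= min(arr))
-- # of the lcm of some three array positions, so take the min of that candidate
-- # over all index triples instead of scanning integers one by one.
-- def _gcd(a, b):
--     while b:
--         a, b = b, a % b
--     return a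
--
-- def _pairs(xs):
--     if len(xs) < 2:
--         return []
--     y, rest = xs[0], xs[1:]
--     return [(y, z) for z in rest] + _pairs(rest)
--
-- def _triples(xs):
--     if len(xs) < 3:
--         return []
--     x, rest = xs[0], xs[1:]
--     return [(x, y, z) for (y, z) in _pairs(rest)] + _triples(rest)
--
-- def compute(arr):
--     m = min(arr)
--     cands = []
--     for (x, y, z) in _triples(arr):
--         l = abs(x) * abs(y) // _gcd(abs(x), abs(y))
--         l = l * abs(z) // _gcd(l, abs(z))
--         cands.append(-((-m) // l) * l)  # smallest multiple of l that is >= m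
--     return min(cands)
-- ===== Notes on version B (the rewrite author's own statement) =====
-- stated objective: alternative
-- what changed: B replaces A's unit-step scan from min(arr) (testing every integer for three divisors) by a closed form: the minimum, over all index triples, of the smallest multiple of lcm(|x|,|y|,|z|) that is >= min(arr).
import Mathlib
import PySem

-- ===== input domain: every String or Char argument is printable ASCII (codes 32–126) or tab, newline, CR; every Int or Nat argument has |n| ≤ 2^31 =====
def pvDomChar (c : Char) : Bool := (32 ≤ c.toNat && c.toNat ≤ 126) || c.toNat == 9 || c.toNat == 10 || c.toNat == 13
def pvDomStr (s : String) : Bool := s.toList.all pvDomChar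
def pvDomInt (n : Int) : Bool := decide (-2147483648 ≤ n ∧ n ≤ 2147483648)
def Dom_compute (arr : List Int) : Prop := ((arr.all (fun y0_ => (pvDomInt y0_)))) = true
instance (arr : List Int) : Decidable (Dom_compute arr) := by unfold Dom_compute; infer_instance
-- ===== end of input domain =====

-- B replaces A's unit-step scan from min(arr) by a closed form: the answer is the
-- minimum over all index triples of the smallest multiple of lcm(|x|,|y|,|z|) ≥ min(arr).

-- ===== PORT A =====
-- one pass of A's inner 'for n in arr' loop, counting n with result % n == 0
def computeCnt (arr : List Int) (result : Int) : Int :=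
  arr.foldl (fun cnt n => if PySem.Int.mod result n = 0 then cnt + 1 else cnt) 0

-- A's 'while True' loop; the Nat argument is pure fuel (the guard only makes the
-- recursion total; Pre_compute guarantees the fuel computed below is never exhausted)
def computeLoop (arr : List Int) : Int → Nat → Int
  | result, 0 => result
  | result, fuel + 1 =>
      if computeCnt arr result > 2 then result else computeLoop arr (result + 1) fuel

-- fuel bound: the smallest multiple of lcm(|a|,|b|,|c|) of the first three elements
-- that is ≥ min(arr) is a stopping point of A's loop and is at most that lcm,
-- so this many steps always suffice under Pre_compute
def computeFuel (arr : List Int) (m : Int) : Nat :=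
  match arr with
  | a :: b :: c :: _ => (((Nat.lcm (Nat.lcm a.natAbs b.natAbs) c.natAbs : Int)) - m).toNat + 1
  | _ => 0

def compute (arr : List Int) : Int :=
  let m := (PySem.List.min? arr (fun x => x)).getD 0   -- min(arr); arr ≠ [] under Pre_compute
  computeLoop arr m (computeFuel arr m)

-- ===== PORT B =====
-- termination fact for the Euclid loop of Source B's _gcd (cited by gcdB's decreasing_by)
theorem pyModAbs_lt (a b : Int) (hb : b ≠ 0) : (PySem.Int.mod a b).natAbs < b.natAbs := by
  rcases lt_or_gt_of_ne hb with h | h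
  · have h1 := PySem.Int.mod_neg_bounds (a := a) h
    omega
  · have h1 := PySem.Int.mod_nonneg (a := a) h
    have h2 := PySem.Int.mod_lt (a := a) h
    omega

-- _gcd: while b: a, b = b, a % b
def gcdB (a b : Int) : Int :=
  if h : b = 0 then a else gcdB b (PySem.Int.mod a b)
termination_by b.natAbs
decreasing_by exact pyModAbs_lt a b h

-- _pairs: all (y, z) with y before z in xs
def pairsB : List Int → List (Int × Int)
  | y :: rest@(_ :: _) => (rest.map fun z => (y, z)) ++ pairsB rest
  | _ => []

-- _triples: all (x, y, z) at increasing positions of xs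
def triplesB : List Int → List (Int × Int × Int)
  | x :: rest@(_ :: _ :: _) => ((pairsB rest).map fun p => (x, p.1, p.2)) ++ triplesB rest
  | _ => []

-- the body of B's for loop: lcm of the absolute values via _gcd, then the
-- smallest multiple of it that is ≥ m (ceiling division -((-m) // l))
def candB (m x y z : Int) : Int :=
  let l1 := PySem.Int.floordiv ((x.natAbs : Int) * (y.natAbs : Int))
              (gcdB (x.natAbs : Int) (y.natAbs : Int))
  let l := PySem.Int.floordiv (l1 * (z.natAbs : Int)) (gcdB l1 (z.natAbs : Int))
  (-(PySem.Int.floordiv (-m) l)) * l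

def compute_alt (arr : List Int) : Int :=
  let m := (PySem.List.min? arr (fun x => x)).getD 0   -- min(arr)
  let cands := (triplesB arr).map (fun t => candB m t.1 t.2.1 t.2.2)
  (PySem.List.min? cands (fun x => x)).getD 0          -- min(cands)

-- ===== PRECONDITION & SPEC =====
-- A raises ZeroDivisionError when 0 ∈ arr, raises ValueError on the empty list, and loops forever
-- with fewer than 3 elements; Pre_ is exactly the inputs where A returns.
def Pre_compute (arr : List Int) : Prop := 3 ≤ arr.length ∧ (0 : Int) ∉ arr
instance (arr : List Int) : Decidable (Pre_compute arr) := by unfold Pre_compute; infer_instance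
def pvWitness_compute : List Int := [4, 6, 10, -3]

def Spec_compute (arr : List Int) (out : Int) : Prop := out = compute_alt arr
instance (arr : List Int) (out : Int) : Decidable (Spec_compute arr out) := by unfold Spec_compute; infer_instance

-- ===== CLAIM (what is proved, stated in full; the proofs are below) =====
def Claim_equal_compute : Prop := ∀ (arr : List Int), Dom_compute arr → Pre_compute arr → Spec_compute arr (compute arr)

-- ===== LEMMAS AND PROOFS =====

-- number of elements of arr dividing r
def divCnt (arr : List Int) (r : Int) : Nat := arr.countP (fun n => decide (n ∣ r))

theorem computeCnt_eq (arr : List Int) (r : Int) :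
    computeCnt arr r = (divCnt arr r : Int) := by
  have key : ∀ (l : List Int) (c : Int),
      l.foldl (fun cnt n => if PySem.Int.mod r n = 0 then cnt + 1 else cnt) c
        = c + (l.countP (fun n => decide (n ∣ r)) : Int) := by
    intro l
    induction l with
    | nil => intro c; simp
    | cons x xs ih =>
      intro c
      simp only [List.foldl_cons, List.countP_cons, ih]
      by_cases h : x ∣ r
      · rw [if_pos ((PySem.Int.mod_eq_zero_iff_dvd r x).mpr h)]
        simp [h]; ring
      · rw [if_neg (fun hc => h ((PySem.Int.mod_eq_zero_iff_dvd r x).mp hc))]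
        simp [h]
  simpa [computeCnt, divCnt] using key arr 0

-- A's loop returns a valid value, and nothing below it (and at or above the start) is valid
theorem loopA_char (arr : List Int) :
    ∀ (fuel : Nat) (r t : Int), r ≤ t → 3 ≤ divCnt arr t → (t - r).toNat < fuel →
      3 ≤ divCnt arr (computeLoop arr r fuel) ∧ r ≤ computeLoop arr r fuel ∧
        ∀ s, r ≤ s → s < computeLoop arr r fuel → ¬ 3 ≤ divCnt arr s := by
  intro fuel
  induction fuel with
  | zero => intro r t _ _ h; omega
  | succ f ih =>
    intro r t hrt hvt hf
    rw [computeLoop]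
    by_cases h : 3 ≤ divCnt arr r
    · rw [if_pos (by rw [computeCnt_eq]; omega)]
      exact ⟨h, le_rfl, fun s h1 h2 _ => by omega⟩
    · have hrt' : r < t := lt_of_le_of_ne hrt (fun he => h (he ▸ hvt))
      rw [if_neg (by rw [computeCnt_eq]; omega)]
      obtain ⟨hv, hle, hno⟩ := ih (r + 1) t (by omega) hvt (by omega)
      refine ⟨hv, by omega, ?_⟩
      intro s h1 h2
      rcases eq_or_lt_of_le h1 with rfl | h1'
      · exact h
      · exact hno s (by omega) h2

-- the lcm of three elements, as used by the fuel bound and by B's candidates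
def tripleLcm (a b c : Int) : Nat := Nat.lcm (Nat.lcm a.natAbs b.natAbs) c.natAbs

theorem tripleLcm_pos {a b c : Int} (h1 : a ≠ 0) (h2 : b ≠ 0) (h3 : c ≠ 0) :
    0 < tripleLcm a b c := by
  have := Int.natAbs_pos.mpr h1
  have := Int.natAbs_pos.mpr h2
  have := Int.natAbs_pos.mpr h3
  exact Nat.pos_of_ne_zero (Nat.lcm_ne_zero (Nat.lcm_ne_zero (by omega) (by omega)) (by omega))

theorem tripleLcm_dvd_iff {a b c r : Int} :
    ((tripleLcm a b c : Nat) : Int) ∣ r ↔ a ∣ r ∧ b ∣ r ∧ c ∣ r := by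
  have cast : ∀ (n : Nat), ((n : Int) ∣ r ↔ n ∣ r.natAbs) := by
    intro n
    rw [← Int.natAbs_dvd_natAbs, Int.natAbs_natCast]
  rw [tripleLcm, cast, Nat.lcm_dvd_iff, Nat.lcm_dvd_iff, ← cast, ← cast, ← cast,
    Int.natAbs_dvd, Int.natAbs_dvd, Int.natAbs_dvd, and_assoc]

-- the smallest multiple of L that is ≥ m
def candTarget (m L : Int) : Int := (-(PySem.Int.floordiv (-m) L)) * L

theorem candTarget_spec (m L : Int) (hL : 0 < L) :
    (L ∣ candTarget m L) ∧ m ≤ candTarget m L ∧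
      (∀ r : Int, L ∣ r → m ≤ r → candTarget m L ≤ r) := by
  set q : Int := -(PySem.Int.floordiv (-m) L) with hq
  have hbr := (PySem.Int.neg_floordiv_neg_eq_iff_of_pos (a := m) (b := L) (q := q) hL).mp rfl
  have hc : candTarget m L = q * L := rfl
  refine ⟨⟨q, by rw [hc]; ring⟩, by rw [hc]; exact hbr.2, ?_⟩
  intro r hdvd hmr
  rcases hdvd with ⟨s, rfl⟩
  have h1 : (q - 1) * L < s * L := by
    calc (q - 1) * L < m := hbr.1
    _ ≤ L * s := hmr
    _ = s * L := by ring
  have : q - 1 < s := lt_of_mul_lt_mul_right h1 (le_of_lt hL)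
  have : q ≤ s := by omega
  calc candTarget m L = q * L := hc
  _ ≤ s * L := mul_le_mul_of_nonneg_right this (le_of_lt hL)
  _ = L * s := by ring

-- Source B's _gcd computes Nat.gcd on nonnegative inputs
theorem gcdB_eq (b a : Nat) : gcdB (a : Int) (b : Int) = (Nat.gcd a b : Int) := by
  induction b using Nat.strong_induction_on generalizing a with
  | _ b ih =>
    rw [gcdB]
    by_cases hb : (b : Int) = 0
    · have : b = 0 := by exact_mod_cast hb
      subst this; simp
    · have hbn : b ≠ 0 := fun h => hb (by exact_mod_cast h)
      rw [dif_neg hb, PySem.Int.mod_natCast, ih (a % b) (Nat.mod_lt _ (Nat.pos_of_ne_zero hbn))]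
      rw [Nat.gcd_comm b (a % b), ← Nat.gcd_rec b a, Nat.gcd_comm]

-- the lcm step of Source B's loop body: a*b//gcd(a,b) = lcm a b
theorem lcmStep_eq (a b : Nat) (_ha : 0 < a) (_hb : 0 < b) :
    PySem.Int.floordiv ((a : Int) * (b : Int)) (gcdB (a : Int) (b : Int))
      = (Nat.lcm a b : Int) := by
  rw [gcdB_eq]
  have h1 : ((a : Int) * (b : Int)) = ((a * b : Nat) : Int) := by push_cast; ring
  rw [h1, PySem.Int.floordiv_natCast]
  norm_cast

-- candB is candTarget of the triple lcm
theorem candB_eq (m x y z : Int) (hx : x ≠ 0) (hy : y ≠ 0) (hz : z ≠ 0) :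
    candB m x y z = candTarget m ((tripleLcm x y z : Nat) : Int) := by
  have hxp := Int.natAbs_pos.mpr hx
  have hyp := Int.natAbs_pos.mpr hy
  have hzp := Int.natAbs_pos.mpr hz
  have hlp : 0 < Nat.lcm x.natAbs y.natAbs :=
    Nat.pos_of_ne_zero (Nat.lcm_ne_zero (by omega) (by omega))
  rw [candB, lcmStep_eq _ _ hxp hyp, lcmStep_eq _ _ hlp hzp]
  rfl

-- pairsB enumerates exactly the ordered pairs = 2-element sublists
theorem pairsB_iff (l : List Int) (y z : Int) :
    (y, z) ∈ pairsB l ↔ List.Sublist [y, z] l := by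
  induction l with
  | nil => simp [pairsB]
  | cons a rest ih =>
    cases rest with
    | nil =>
      simp only [pairsB]
      constructor
      · intro h; simp at h
      · intro h
        rcases List.sublist_cons_iff.mp h with h' | ⟨r, he, hr⟩
        · simp at h'
        · cases he; simp at hr
    | cons b t =>
      simp only [pairsB, List.mem_append, List.mem_map, ih]
      constructor
      · rintro (⟨w, hw, he⟩ | h)
        · cases he
          exact List.cons_sublist_cons.mpr (List.singleton_sublist.mpr hw)
        · exact h.trans (List.sublist_cons_self a _)
      · intro h
        rcases List.sublist_cons_iff.mp h with h' | ⟨r, he, hr⟩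
        · right; exact h'
        · cases he
          left
          exact ⟨z, List.singleton_sublist.mp hr, rfl⟩

-- triplesB enumerates exactly the 3-element sublists
theorem triplesB_iff (l : List Int) (x y z : Int) :
    (x, y, z) ∈ triplesB l ↔ List.Sublist [x, y, z] l := by
  induction l with
  | nil => simp [triplesB]
  | cons a rest ih =>
    match rest with
    | [] =>
      simp only [triplesB]
      constructor
      · intro h; simp at h
      · intro h
        rcases List.sublist_cons_iff.mp h with h' | ⟨r, he, hr⟩
        · simp at h'
        · cases he; simp at hr
    | [b] =>
      simp only [triplesB]
      constructor
      · intro h; simp at h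
      · intro h
        rcases List.sublist_cons_iff.mp h with h' | ⟨r, he, hr⟩
        · exact absurd (h'.length_le) (by simp)
        · cases he
          exact absurd (hr.length_le) (by simp)
    | b :: c :: t =>
      simp only [triplesB, List.mem_append, List.mem_map, ih]
      constructor
      · rintro (⟨p, hp, he⟩ | h)
        · cases he
          exact List.cons_sublist_cons.mpr ((pairsB_iff _ _ _).mp hp)
        · exact h.trans (List.sublist_cons_self a _)
      · intro h
        rcases List.sublist_cons_iff.mp h with h' | ⟨r, he, hr⟩
        · right; exact h'
        · cases he
          left
          exact ⟨(y, z), (pairsB_iff _ _ _).mpr hr, rfl⟩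

-- a count of at least 3 yields three distinct positions satisfying the predicate
theorem exists_triple_of_countP {l : List Int} {p : Int → Bool}
    (h : 3 ≤ l.countP p) :
    ∃ x y z, List.Sublist [x, y, z] l ∧ p x ∧ p y ∧ p z := by
  have hlen : 3 ≤ (l.filter p).length := by
    rw [← List.countP_eq_length_filter]; exact h
  match hf : l.filter p, hlen with
  | x :: y :: z :: t, _ =>
    have hsub : List.Sublist [x, y, z] l := by
      have h1 : List.Sublist [x, y, z] (l.filter p) := by
        rw [hf]
        exact (List.sublist_append_left [x, y, z] t).trans (by simp)
      exact h1.trans (List.filter_sublist)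
    have hx : p x := List.of_mem_filter (by rw [hf]; simp)
    have hy : p y := List.of_mem_filter (by rw [hf]; simp)
    have hz : p z := List.of_mem_filter (by rw [hf]; simp)
    exact ⟨x, y, z, hsub, hx, hy, hz⟩

-- a 3-element sublist of predicate-satisfying elements forces countP ≥ 3
theorem countP_of_triple {l : List Int} {p : Int → Bool} {x y z : Int}
    (hsub : List.Sublist [x, y, z] l) (hx : p x) (hy : p y) (hz : p z) :
    3 ≤ l.countP p := by
  have := hsub.countP_le (p := p)
  simp [hx, hy, hz] at this
  omega

-- ===== VERDICT (by name: the statement is the Claim_ definition above) =====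
theorem compute_spec : Claim_equal_compute := by
  intro arr _ hpre
  rcases hpre with ⟨hlen, hz⟩
  match arr, hlen with
  | a :: b :: c :: rest, _ =>
  set arr := a :: b :: c :: rest with harr
  have hne : arr ≠ [] := by simp [harr]
  have hnz : ∀ y ∈ arr, y ≠ 0 := fun y hy he => hz (he ▸ hy)
  -- the minimum
  obtain ⟨m0, hm0⟩ : ∃ m0, PySem.List.min? arr (fun x => x) = some m0 := by
    cases h : PySem.List.min? arr (fun x => x) with
    | none => exact absurd ((PySem.List.min?_eq_none_iff arr _).mp h) hne
    | some v => exact ⟨v, rfl⟩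
  have hmmin : ∀ y ∈ arr, m0 ≤ y := PySem.List.min?_isMin hm0
  -- every candidate of B is candTarget of its triple lcm, is ≥ m0 and valid
  have hcand : ∀ t ∈ triplesB arr, candB m0 t.1 t.2.1 t.2.2
      = candTarget m0 ((tripleLcm t.1 t.2.1 t.2.2 : Nat) : Int) ∧
      m0 ≤ candB m0 t.1 t.2.1 t.2.2 ∧ 3 ≤ divCnt arr (candB m0 t.1 t.2.1 t.2.2) := by
    rintro ⟨x, y, z⟩ ht
    have hsub : List.Sublist [x, y, z] arr := (triplesB_iff _ _ _ _).mp ht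
    have hxm : x ∈ arr := hsub.subset (by simp)
    have hym : y ∈ arr := hsub.subset (by simp)
    have hzm : z ∈ arr := hsub.subset (by simp)
    have hx := hnz x hxm; have hy := hnz y hym; have hz' := hnz z hzm
    have hL : 0 < ((tripleLcm x y z : Nat) : Int) := by
      exact_mod_cast tripleLcm_pos hx hy hz'
    obtain ⟨hdvd, hge, _⟩ := candTarget_spec m0 _ hL
    obtain ⟨hdx, hdy, hdz⟩ := tripleLcm_dvd_iff.mp hdvd
    have heq := candB_eq m0 x y z hx hy hz'
    refine ⟨heq, by rw [heq]; exact hge, ?_⟩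
    rw [heq, divCnt]
    exact countP_of_triple hsub (by simp [hdx]) (by simp [hdy]) (by simp [hdz])
  -- B's result: a member of the candidate list, and minimal in it
  have htne : (a, b, c) ∈ triplesB arr := by
    rw [triplesB_iff, harr]
    exact (List.sublist_append_left [a, b, c] rest).trans (by simp)
  set cands := (triplesB arr).map (fun t => candB m0 t.1 t.2.1 t.2.2) with hcands
  obtain ⟨rB, hrB⟩ : ∃ rB, PySem.List.min? cands (fun x => x) = some rB := by
    cases h : PySem.List.min? cands (fun x => x) with
    | none =>
      have := (PySem.List.min?_eq_none_iff cands _).mp h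
      rw [hcands] at this
      exact absurd (List.mem_map.mpr ⟨(a, b, c), htne, rfl⟩) (by rw [this]; simp)
    | some v => exact ⟨v, rfl⟩
  have hrBmem := PySem.List.min?_mem hrB
  have hrBmin := PySem.List.min?_isMin hrB
  rw [hcands, List.mem_map] at hrBmem
  rcases hrBmem with ⟨t, ht, hteq⟩
  obtain ⟨_, hrBge, hrBvalid⟩ := hcand t ht
  rw [hteq] at hrBge hrBvalid
  -- characterize A's result (fuel: the candidate of the first three elements suffices)
  have hL3pos : 0 < tripleLcm a b c :=
    tripleLcm_pos (hnz a (by simp [harr])) (hnz b (by simp [harr])) (hnz c (by simp [harr]))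
  set L3 : Int := ((tripleLcm a b c : Nat) : Int) with hL3
  have hL3p : 0 < L3 := by rw [hL3]; exact_mod_cast hL3pos
  obtain ⟨ht0dvd, ht0ge, ht0min⟩ := candTarget_spec m0 L3 hL3p
  set t0 : Int := candTarget m0 L3 with ht0
  obtain ⟨hda, hdb, hdc⟩ := tripleLcm_dvd_iff.mp ht0dvd
  have ht0valid : 3 ≤ divCnt arr t0 := by
    rw [divCnt]
    exact countP_of_triple (l := arr) (x := a) (y := b) (z := c)
      (by rw [harr]; exact (List.sublist_append_left [a, b, c] rest).trans (by simp))
      (by simp [hda]) (by simp [hdb]) (by simp [hdc])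
  have hm0a : m0 ≤ a := hmmin a (by simp [harr])
  have haL3 : a ≤ L3 := by
    have hdvd : a.natAbs ∣ tripleLcm a b c :=
      dvd_trans (Nat.dvd_lcm_left _ _) (Nat.dvd_lcm_left _ _)
    have h1 : (a.natAbs : Int) ≤ L3 := by
      rw [hL3]; exact_mod_cast Nat.le_of_dvd hL3pos hdvd
    calc a ≤ (a.natAbs : Int) := Int.le_natAbs
    _ ≤ L3 := h1
  have ht0L3 : t0 ≤ L3 := ht0min L3 dvd_rfl (by omega)
  have hfuel : computeFuel arr m0 = (L3 - m0).toNat + 1 := by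
    rw [harr, computeFuel, hL3, tripleLcm]
  obtain ⟨hAv, hAge, hAno⟩ := loopA_char arr (computeFuel arr m0) m0 t0 (by omega)
    ht0valid (by rw [hfuel]; omega)
  set AR : Int := computeLoop arr m0 (computeFuel arr m0) with hAR
  -- rB ≥ AR: rB is valid and ≥ m0, and nothing valid lies in [m0, AR)
  have h1 : AR ≤ rB := by
    by_contra hgt
    exact hAno rB hrBge (by omega) hrBvalid
  -- rB ≤ AR: AR is valid, so some triple divides it, whose candidate is ≤ AR and ≥ rB
  have h2 : rB ≤ AR := by
    obtain ⟨x, y, z, hsub, hpx, hpy, hpz⟩ :=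
      exists_triple_of_countP (l := arr) (p := fun n => decide (n ∣ AR)) hAv
    have hdx : x ∣ AR := by simpa using hpx
    have hdy : y ∣ AR := by simpa using hpy
    have hdz : z ∣ AR := by simpa using hpz
    have hxm : x ∈ arr := hsub.subset (by simp)
    have hym : y ∈ arr := hsub.subset (by simp)
    have hzm : z ∈ arr := hsub.subset (by simp)
    have hx := hnz x hxm; have hy := hnz y hym; have hz' := hnz z hzm
    have hLp : 0 < ((tripleLcm x y z : Nat) : Int) := by
      exact_mod_cast tripleLcm_pos hx hy hz'
    obtain ⟨_, _, hmin⟩ := candTarget_spec m0 ((tripleLcm x y z : Nat) : Int) hLp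
    have hdvdAR : ((tripleLcm x y z : Nat) : Int) ∣ AR :=
      tripleLcm_dvd_iff.mpr ⟨hdx, hdy, hdz⟩
    have hcle : candTarget m0 ((tripleLcm x y z : Nat) : Int) ≤ AR := hmin AR hdvdAR hAge
    have hmem : (x, y, z) ∈ triplesB arr := (triplesB_iff _ _ _ _).mpr hsub
    have hrle := hrBmin _ (by rw [hcands]; exact List.mem_map.mpr ⟨(x, y, z), hmem, rfl⟩)
    obtain ⟨heq, _, _⟩ := hcand (x, y, z) hmem
    simp only at hrle heq
    rw [heq] at hrle
    omega
  have hEq : rB = AR := by omega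
  rw [Spec_compute, compute, compute_alt]
  simp only [hm0, Option.getD_some]
  rw [← hcands, hrB, Option.getD_some, hEq, hAR]
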